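-- pv_equiv track=rewrite | github.com/eletricells/Vantdge | TODO/Case Series/drug_repurposing_agent.py | _score_clinical_signal
-- ===== SOURCE A (Python) =====
-- from typing import Dict, List, Optional, Tuple
--
-- def _score_clinical_signal(case: Dict) -> int:
--     """Scores clinical signal strength (1-10)"""
--     score = 5  # Base
--
--     # Response rate
--     response = case.get('response_rate', '')
--     if '100%' in response:
--         score += 2
--     elif any(x in response for x in ['80%', '90%']):
--         score += 1
--
--     # Effect size
--     effect = case.get('effect_size_description', '').lower()
--     if 'strong' in effect or 'complete' in effect:
--         score += 2
--     elif 'moderate' in effect: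
--         score += 1
--
--     # Durability
--     durability = case.get('durability_signal', '').lower()
--     if any(x in durability for x in ['months', 'sustained', 'long-term']):
--         score += 1
--
--     return min(10, max(1, score))
-- ===== SOURCE B (Python) =====
-- def _field_points(key, value):
--     """Signal points contributed by a single case field."""
--     if key == 'response_rate':
--         return 2 if '100%' in value else 1 if '80%' in value or '90%' in value else 0
--     if key == 'effect_size_description':
--         v = value.lower()
--         return 2 if 'strong' in v or 'complete' in v else 1 if 'moderate' in v else 0
--     if key == 'durability_signal':
--         v = value.lower()
--         return 1 if any(x in v for x in ('months', 'sustained', 'long-term')) else 0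
--     return 0
--
--
-- def _score_clinical_signal(case):
--     """Scores clinical signal strength (1-10): one pass over the case's items."""
--     raw = 5 + sum(_field_points(k, v) for k, v in case.items())
--     return min(10, max(1, raw))
-- ===== Notes on version B (the rewrite author's own statement) =====
-- stated objective: alternative
-- what changed: Instead of A's three keyed dict lookups each followed by a hardcoded if/elif block, B makes one pass over the case's own items, dispatching each (key, value) pair to a per-field points function and summing the contributions onto the base score (order-independence of the sum is what the proof establishes).
import Mathlib
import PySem

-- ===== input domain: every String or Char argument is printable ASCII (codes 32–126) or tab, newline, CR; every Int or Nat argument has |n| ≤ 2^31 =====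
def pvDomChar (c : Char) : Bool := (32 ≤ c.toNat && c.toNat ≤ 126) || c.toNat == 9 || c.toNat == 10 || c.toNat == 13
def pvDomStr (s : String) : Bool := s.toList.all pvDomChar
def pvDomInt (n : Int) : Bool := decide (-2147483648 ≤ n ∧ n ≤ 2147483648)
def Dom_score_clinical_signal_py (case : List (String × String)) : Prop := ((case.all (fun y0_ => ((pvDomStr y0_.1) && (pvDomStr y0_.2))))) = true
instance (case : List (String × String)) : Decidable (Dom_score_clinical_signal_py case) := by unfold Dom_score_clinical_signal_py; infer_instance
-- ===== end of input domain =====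

-- B scores by ONE pass over the case's own items (per-field dispatch, summed), instead of A's three keyed lookups; objective: alternative.

-- ===== PORT A =====
def score_clinical_signal_py (case : List (String × String)) : Int :=
  let score : Int := 5
  let response := (PySem.Dict.mk case).getD "response_rate" ""
  let score := if PySem.Str.isIn "100%" response then score + 2
    else if ["80%", "90%"].any (fun x => PySem.Str.isIn x response) then score + 1
    else score
  let effect := PySem.Str.lower ((PySem.Dict.mk case).getD "effect_size_description" "")
  let score := if PySem.Str.isIn "strong" effect || PySem.Str.isIn "complete" effect then score + 2
    else if PySem.Str.isIn "moderate" effect then score + 1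
    else score
  let durability := PySem.Str.lower ((PySem.Dict.mk case).getD "durability_signal" "")
  let score := if ["months", "sustained", "long-term"].any (fun x => PySem.Str.isIn x durability) then score + 1
    else score
  min 10 (max 1 score)

-- ===== PORT B =====
def pvFieldPoints (key value : String) : Int :=
  if key == "response_rate" then
    if PySem.Str.isIn "100%" value then 2
    else if PySem.Str.isIn "80%" value || PySem.Str.isIn "90%" value then 1
    else 0
  else if key == "effect_size_description" then
    let v := PySem.Str.lower value
    if PySem.Str.isIn "strong" v || PySem.Str.isIn "complete" v then 2
    else if PySem.Str.isIn "moderate" v then 1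
    else 0
  else if key == "durability_signal" then
    let v := PySem.Str.lower value
    if ["months", "sustained", "long-term"].any (fun x => PySem.Str.isIn x v) then 1
    else 0
  else 0

-- sum of _field_points over case.items(); the assoc list models a dict (first
-- occurrence of a key wins), so later pairs with an already-seen key are dropped
def pvSumPoints : List (String × String) → Int
  | [] => 0
  | (k, v) :: rest => pvFieldPoints k v + pvSumPoints (rest.filter (fun p => !(p.1 == k)))
termination_by l => l.length
decreasing_by
  simp only [List.length_cons, List.length_unattach]
  exact Nat.lt_succ_of_le (le_trans (List.length_filter_le _ rest.attach) (by simp))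

def score_clinical_signal_py_alt (case : List (String × String)) : Int :=
  let raw := 5 + pvSumPoints case
  min 10 (max 1 raw)

-- ===== PRECONDITION & SPEC =====
def Spec_score_clinical_signal_py (case : List (String × String)) (out : Int) : Prop := out = score_clinical_signal_py_alt case
instance (case : List (String × String)) (out : Int) : Decidable (Spec_score_clinical_signal_py case out) := by unfold Spec_score_clinical_signal_py; infer_instance

-- ===== CLAIM (what is proved, stated in full; the proofs are below) =====
def Claim_equal_score_clinical_signal_py : Prop := ∀ (case : List (String × String)), Dom_score_clinical_signal_py case → Spec_score_clinical_signal_py case (score_clinical_signal_py case)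

-- ===== LEMMAS AND PROOFS =====

-- lookup in the list with key k filtered out: k now misses, other keys unchanged
theorem getD_mk_filter_ne (rest : List (String × String)) (k x : String) :
    (PySem.Dict.mk (rest.filter (fun p => !(p.1 == k)))).getD x "" =
      if x = k then "" else (PySem.Dict.mk rest).getD x "" := by
  induction rest with
  | nil => simp [PySem.Dict.getD, PySem.Dict.get?]
  | cons hd tl ih =>
      obtain ⟨a, b⟩ := hd
      by_cases hk : a = k
      · simp only [List.filter_cons, hk, beq_self_eq_true, Bool.not_true,
          Bool.false_eq_true, if_false, ih]
        by_cases hx : x = k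
        · simp [hx]
        · have hax : (k == x) = false := by simpa using fun h => hx h.symm
          simp [hx, PySem.Dict.getD_eq_get?_getD, PySem.Dict.get?_mk_cons, hax]
      · have hbk : (!(a == k)) = true := by simpa using hk
        simp only [List.filter_cons, hbk, if_true]
        by_cases hax : a = x
        · have hxk : ¬ x = k := fun h => hk (by rw [hax, h])
          simp [hax, hxk, PySem.Dict.getD_eq_get?_getD, PySem.Dict.get?_mk_cons]
        · have hbx : (a == x) = false := by simpa using hax
          simp only [PySem.Dict.getD_eq_get?_getD, PySem.Dict.get?_mk_cons, hbx,
            Bool.false_eq_true, if_false]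
          simpa [PySem.Dict.getD_eq_get?_getD] using ih

theorem pvSum_eq (l : List (String × String)) :
    pvSumPoints l =
      pvFieldPoints "response_rate" ((PySem.Dict.mk l).getD "response_rate" "")
      + pvFieldPoints "effect_size_description" ((PySem.Dict.mk l).getD "effect_size_description" "")
      + pvFieldPoints "durability_signal" ((PySem.Dict.mk l).getD "durability_signal" "") := by
  match l with
  | [] =>
      simp [pvSumPoints, PySem.Dict.getD, PySem.Dict.get?]
      decide
  | (k, v) :: rest =>
      have ih := pvSum_eq (rest.filter (fun p => !(p.1 == k)))
      rw [pvSumPoints.eq_def]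
      simp only []
      rw [ih]
      rw [getD_mk_filter_ne, getD_mk_filter_ne, getD_mk_filter_ne]
      have hcons : ∀ x : String, (PySem.Dict.mk ((k, v) :: rest)).getD x "" =
          if k = x then v else (PySem.Dict.mk rest).getD x "" := by
        intro x
        simp [PySem.Dict.getD_eq_get?_getD, PySem.Dict.get?_mk_cons]
        split <;> simp [← PySem.Dict.getD_eq_get?_getD]
      rw [hcons, hcons, hcons]
      by_cases h1 : k = "response_rate"
      · subst h1
        have z : pvFieldPoints "response_rate" "" = 0 := by decide
        simp [z]
        ring
      · by_cases h2 : k = "effect_size_description"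
        · subst h2
          have z : pvFieldPoints "effect_size_description" "" = 0 := by decide
          simp [h1, z]
          ring
        · by_cases h3 : k = "durability_signal"
          · subst h3
            have z : pvFieldPoints "durability_signal" "" = 0 := by decide
            simp [h1, h2, z]
            ring
          · have hz : pvFieldPoints k v = 0 := by
              simp [pvFieldPoints, h1, h2, h3]
            simp [hz, h1, h2, h3, Ne.symm h1, Ne.symm h2, Ne.symm h3]
termination_by l.length
decreasing_by
  simpa using Nat.lt_succ_of_le (List.length_filter_le _ _)

-- ===== VERDICT (by name: the statement is the Claim_ definition above) =====
theorem score_clinical_signal_py_spec : Claim_equal_score_clinical_signal_py := by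
  intro case _
  unfold Spec_score_clinical_signal_py score_clinical_signal_py score_clinical_signal_py_alt
  rw [pvSum_eq]
  simp only [pvFieldPoints, List.any, beq_self_eq_true, if_true, Bool.or_false,
    String.reduceBEq, if_false, Bool.false_eq_true]
  split_ifs <;> omega
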